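-- pv_equiv track=rewrite | github.com/scaling-group/eve | configs/eve/application/icon/tests/status_watcher.py | parse_qstat_output
-- ===== SOURCE A (Python) =====
-- def parse_qstat_output(output: str) -> tuple[str, str | None]:
--     job_state = ""
--     exit_status: str | None = None
--     for line in output.splitlines():
--         stripped = line.strip()
--         if stripped.startswith("job_state = "):
--             job_state = stripped.split(" = ", 1)[1]
--         elif stripped.startswith("Exit_status = "):
--             exit_status = stripped.split(" = ", 1)[1]
--     return job_state, exit_status
-- ===== SOURCE B (Python) =====
-- def parse_qstat_output(output: str) -> tuple[str, str | None]:
--     fields = {}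
--     for line in output.splitlines():
--         stripped = line.strip()
--         i = stripped.find(" = ")
--         if i != -1:
--             fields[stripped[:i]] = stripped[i + 3:]
--     return fields.get("job_state", ""), fields.get("Exit_status")
-- ===== Notes on version B (the rewrite author's own statement) =====
-- stated objective: alternative
-- what changed: B builds a dict of all fields in one generic pass (each stripped line is cut at the first occurrence of the separator, later lines overwrite) and then looks up the two wanted keys, instead of A's two hard-coded startswith branches updating two accumulator variables.
import Mathlib
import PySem

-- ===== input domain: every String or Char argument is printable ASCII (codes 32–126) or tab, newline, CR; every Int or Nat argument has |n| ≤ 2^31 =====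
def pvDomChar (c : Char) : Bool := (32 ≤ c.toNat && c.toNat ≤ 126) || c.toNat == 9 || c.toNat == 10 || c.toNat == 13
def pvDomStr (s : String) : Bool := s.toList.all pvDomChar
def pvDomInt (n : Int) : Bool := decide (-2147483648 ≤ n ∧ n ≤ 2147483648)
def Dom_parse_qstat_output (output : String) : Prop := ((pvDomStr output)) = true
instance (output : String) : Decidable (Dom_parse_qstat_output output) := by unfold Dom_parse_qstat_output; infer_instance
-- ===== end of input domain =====

-- B replaces A's two hard-coded startswith branches by one generic pass that indexes every
-- "key = value" line into a dict (split at the first " = ") and then looks up the two keys.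

-- ===== PORT A =====
def parse_qstat_output (output : String) : String × Option String :=
  let res :=
    (PySem.Chars.splitlines output.toList).foldl
      (fun st line =>
        let stripped := PySem.Chars.strip line
        if PySem.Chars.startswith stripped "job_state = ".toList then
          -- Python's `[1]`: exact here — the startswith guard guarantees " = " occurs, so
          -- the split has a second part and the IndexError branch (pyGet? = none) is unreachable
          (((PySem.List.pyGet? (PySem.Chars.splitOnMax stripped " = ".toList 1) 1).getD []), st.2)
        else if PySem.Chars.startswith stripped "Exit_status = ".toList then
          (st.1, some ((PySem.List.pyGet? (PySem.Chars.splitOnMax stripped " = ".toList 1) 1).getD []))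
        else st)
      (([] : List Char), (none : Option (List Char)))
  (String.ofList res.1, res.2.map String.ofList)

-- ===== PORT B =====
def parse_qstat_output_alt (output : String) : String × Option String :=
  let fields :=
    (PySem.Chars.splitlines output.toList).foldl
      (fun d line =>
        let stripped := PySem.Chars.strip line
        let i := PySem.Chars.find stripped " = ".toList
        if i ≠ -1 then
          d.insert (PySem.List.slice stripped none (some i)) (PySem.List.slice stripped (some (i + 3)) none)
        else d)
      (PySem.Dict.empty : PySem.Dict (List Char) (List Char))
  (String.ofList (fields.getD "job_state".toList []), (fields.get? "Exit_status".toList).map String.ofList)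

-- ===== PRECONDITION & SPEC =====
def Spec_parse_qstat_output (output : String) (out : String × Option String) : Prop := out = parse_qstat_output_alt output
instance (output : String) (out : String × Option String) : Decidable (Spec_parse_qstat_output output out) := by unfold Spec_parse_qstat_output; infer_instance

-- ===== CLAIM (what is proved, stated in full; the proofs are below) =====
def Claim_equal_parse_qstat_output : Prop := ∀ (output : String), Dom_parse_qstat_output output → Spec_parse_qstat_output output (parse_qstat_output output)

-- ===== LEMMAS AND PROOFS =====

-- A's per-line step (definitionally the lambda inside parse_qstat_output)
def pvStepA (st : List Char × Option (List Char)) (line : List Char) : List Char × Option (List Char) :=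
  let stripped := PySem.Chars.strip line
  if PySem.Chars.startswith stripped "job_state = ".toList then
    (((PySem.List.pyGet? (PySem.Chars.splitOnMax stripped " = ".toList 1) 1).getD []), st.2)
  else if PySem.Chars.startswith stripped "Exit_status = ".toList then
    (st.1, some ((PySem.List.pyGet? (PySem.Chars.splitOnMax stripped " = ".toList 1) 1).getD []))
  else st

-- B's per-line step (definitionally the lambda inside parse_qstat_output_alt)
def pvStepB (d : PySem.Dict (List Char) (List Char)) (line : List Char) : PySem.Dict (List Char) (List Char) :=
  let stripped := PySem.Chars.strip line
  let i := PySem.Chars.find stripped " = ".toList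
  if i ≠ -1 then
    d.insert (PySem.List.slice stripped none (some i)) (PySem.List.slice stripped (some (i + 3)) none)
  else d

-- the maxsplit-exhausted tail of the split loop returns the rest as one piece
theorem go_zero (sep : List Char) (fuel : Nat) (l cur : List Char) (acc : List (List Char)) :
    PySem.Chars.splitOnMax.go sep fuel 0 l cur acc = ((cur.reverse ++ l) :: acc).reverse := by
  cases fuel with
  | zero => simp [PySem.Chars.splitOnMax.go]
  | succ f => cases l <;> simp [PySem.Chars.splitOnMax.go]

-- find.go only shifts the result by its start index
theorem findgo_shift (sub : List Char) : ∀ (l : List Char) (k : Nat),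
    PySem.Chars.find.go sub l k =
      if PySem.Chars.find.go sub l 0 = -1 then -1 else PySem.Chars.find.go sub l 0 + k := by
  intro l
  induction l with
  | nil => intro k; by_cases h : sub.isEmpty <;> simp [PySem.Chars.find.go, h]
  | cons c rest ih =>
    intro k
    by_cases h : sub.isPrefixOf (c :: rest)
    · simp [PySem.Chars.find.go, h]
    · have hge : -1 ≤ PySem.Chars.find.go sub rest 0 := by
        have := PySem.Chars.neg_one_le_find rest sub
        simpa [PySem.Chars.find] using this
      simp only [PySem.Chars.find.go, h]
      rw [ih (k+1), ih 1]
      by_cases h0 : PySem.Chars.find.go sub rest 0 = -1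
      · simp [h0]
      · simp [h0]; omega

theorem find_cons_not_prefix (sub c rest) (h : sub.isPrefixOf (c :: rest) = false) :
    PySem.Chars.find (c :: rest) sub =
      if PySem.Chars.find rest sub = -1 then -1 else PySem.Chars.find rest sub + 1 := by
  simp only [PySem.Chars.find, PySem.Chars.find.go, h]
  rw [findgo_shift]; norm_num

theorem find_cons_prefix (sub c rest) (h : sub.isPrefixOf (c :: rest) = true) :
    PySem.Chars.find (c :: rest) sub = 0 := by
  simp [PySem.Chars.find, PySem.Chars.find.go, h]

-- split with maxsplit=1: cut at the first occurrence of sep (characterised through find)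
theorem go_one_spec (sep : List Char) (hsep : sep ≠ []) : ∀ (l : List Char) (fuel : Nat)
    (cur : List Char) (acc : List (List Char)), l.length < fuel →
    PySem.Chars.splitOnMax.go sep fuel 1 l cur acc =
      if PySem.Chars.find l sep = -1 then ((cur.reverse ++ l) :: acc).reverse
      else (l.drop ((PySem.Chars.find l sep).toNat + sep.length)
              :: (cur.reverse ++ l.take ((PySem.Chars.find l sep).toNat)) :: acc).reverse := by
  intro l
  induction l with
  | nil =>
    intro fuel cur acc hf
    obtain ⟨f, rfl⟩ : ∃ f, fuel = f + 1 := ⟨fuel - 1, by omega⟩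
    have hfind : PySem.Chars.find [] sep = -1 := by
      simp [PySem.Chars.find, PySem.Chars.find.go, List.isEmpty_iff, hsep]
    simp [PySem.Chars.splitOnMax.go, hfind]
  | cons c rest ih =>
    intro fuel cur acc hf
    obtain ⟨f, rfl⟩ : ∃ f, fuel = f + 1 := ⟨fuel - 1, by omega⟩
    by_cases hp : sep.isPrefixOf (c :: rest)
    · have hfind := find_cons_prefix sep c rest hp
      simp only [PySem.Chars.splitOnMax.go, hp, if_true]
      norm_num [hfind, go_zero]
    · have hfind := find_cons_not_prefix sep c rest (Bool.eq_false_iff.mpr hp)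
      have hrec : PySem.Chars.splitOnMax.go sep (f+1) 1 (c :: rest) cur acc
          = PySem.Chars.splitOnMax.go sep f 1 rest (c :: cur) acc := by
        simp [PySem.Chars.splitOnMax.go, hp]
      rw [hrec, ih f (c :: cur) acc (by simp at hf; omega)]
      by_cases h0 : PySem.Chars.find rest sep = -1
      · simp [hfind, h0]
      · have hge : 0 ≤ PySem.Chars.find rest sep := by
          have := PySem.Chars.neg_one_le_find rest sep; omega
        obtain ⟨k, hk⟩ := Int.eq_ofNat_of_zero_le hge
        have : PySem.Chars.find (c :: rest) sep = ((k + 1 : Nat) : Int) := by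
          rw [hfind, if_neg h0, hk]; push_cast; ring
        rw [this, hk]
        simp only [Int.toNat_natCast, List.take_succ_cons]
        rw [if_neg (show ¬((k:Int) = -1) by omega),
            if_neg (show ¬(((k+1:Nat):Int) = -1) by push_cast; omega)]
        rw [show k+1+sep.length = (k+sep.length)+1 by ring]
        simp

theorem splitOnMax_one (s sep : List Char) (hsep : sep ≠ []) :
    PySem.Chars.splitOnMax s sep 1 =
      if PySem.Chars.find s sep = -1 then [s]
      else [s.take ((PySem.Chars.find s sep).toNat), s.drop ((PySem.Chars.find s sep).toNat + sep.length)] := by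
  show PySem.Chars.splitOnMax.go sep (s.length + 1) 1 s [] [] = _
  rw [go_one_spec sep hsep s (s.length + 1) [] [] (by omega)]
  by_cases h : PySem.Chars.find s sep = -1 <;> simp [h]

-- a " = " prefix starts with a space
theorem sep_prefix_head (rest l : List Char) (h : (' ' :: rest) <+: l) : l.head? = some ' ' := by
  obtain ⟨u, hu⟩ := h
  subst hu; rfl

-- on a line  key ++ " = " ++ t  whose key has no space, find locates the separator exactly at key.length
theorem field_line (key t : List Char) (hkey : ' ' ∉ key) :
    PySem.Chars.find (key ++ [' ','=',' '] ++ t) [' ','=',' '] = (key.length : Int) := by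
  set s := key ++ [' ','=',' '] ++ t with hs
  have hinf : [' ','=',' '] <:+: s := ⟨key, t, by simp [hs]⟩
  have h0 : 0 ≤ PySem.Chars.find s [' ','=',' '] := (PySem.Chars.find_nonneg_iff s _).2 hinf
  obtain ⟨hpre, hmin⟩ := PySem.Chars.find_spec h0
  set f := (PySem.Chars.find s [' ','=',' ']).toNat with hfdef
  rcases lt_trichotomy f key.length with h | h | h
  · exfalso
    have hh : (List.drop f s).head? = some ' ' := sep_prefix_head _ _ hpre
    have hh2 : (List.drop f s).head? = s[f]? := by rw [List.head?_drop]
    have hs2 : s[f]? = key[f]? := by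
      rw [hs, List.append_assoc, List.getElem?_append_left h]
    have hsome : key[f]? = some ' ' := by rw [← hs2, ← hh2, hh]
    exact hkey (List.mem_of_getElem? hsome)
  · have := Int.toNat_of_nonneg h0
    omega
  · exfalso
    refine hmin key.length h ?_
    rw [hs, List.append_assoc, List.drop_left]
    exact ⟨t, rfl⟩

-- the whole line is  (chars before the first " = ") ++ " = " ++ (chars after it)
theorem find_recover (s : List Char) (hne : PySem.Chars.find s [' ','=',' '] ≠ -1) :
    s = s.take ((PySem.Chars.find s [' ','=',' ']).toNat) ++ [' ','=',' ']
        ++ s.drop ((PySem.Chars.find s [' ','=',' ']).toNat + 3) := by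
  have h0 : 0 ≤ PySem.Chars.find s [' ','=',' '] := by
    have := PySem.Chars.neg_one_le_find s [' ','=',' ']; omega
  obtain ⟨hpre, -⟩ := PySem.Chars.find_spec h0
  set f := (PySem.Chars.find s [' ','=',' ']).toNat with hf
  obtain ⟨u, hu⟩ := hpre
  have hu2 : s.drop (f + 3) = u := by
    have h3 : List.drop 3 (List.drop f s) = u := by rw [← hu]; rfl
    rw [← h3, List.drop_drop]
  have h1 : s = s.take f ++ s.drop f := (List.take_append_drop f s).symm
  calc s = s.take f ++ s.drop f := h1
    _ = s.take f ++ ([' ','=',' '] ++ u) := by rw [hu]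
    _ = s.take f ++ [' ','=',' '] ++ s.drop (f + 3) := by rw [hu2, List.append_assoc]

-- per-line invariant: B's dict tracks A's two accumulators
set_option maxRecDepth 8192 in
theorem step_inv (d : PySem.Dict (List Char) (List Char)) (line : List Char) :
    ((pvStepB d line).getD "job_state".toList [] =
       (pvStepA (d.getD "job_state".toList [], d.get? "Exit_status".toList) line).1)
  ∧ ((pvStepB d line).get? "Exit_status".toList =
       (pvStepA (d.getD "job_state".toList [], d.get? "Exit_status".toList) line).2) := by
  unfold pvStepA pvStepB
  simp only [show (" = ".toList) = [' ','=',' '] from rfl]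
  set s := PySem.Chars.strip line with hsdef
  by_cases hj : PySem.Chars.startswith s "job_state = ".toList = true
  · obtain ⟨t, ht⟩ := (PySem.Chars.startswith_iff s _).1 hj
    have hsform : s = "job_state".toList ++ [' ','=',' '] ++ t := by rw [← ht]; rfl
    have hfind : PySem.Chars.find s [' ','=',' '] = (9 : Int) := by
      rw [hsform]; exact_mod_cast field_line "job_state".toList t (by decide)
    have htake : s.take 9 = "job_state".toList := by
      rw [hsform, List.append_assoc]; exact List.take_left' rfl
    rw [hj]
    simp only [if_true]
    rw [splitOnMax_one s [' ','=',' '] (by simp), hfind]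
    rw [if_neg (by norm_num : ¬ ((9:Int) = -1)), if_pos (by norm_num : (9:Int) ≠ -1)]
    rw [PySem.List.slice_to s (by norm_num : (0:Int) ≤ 9),
        PySem.List.slice_from s (by norm_num : (0:Int) ≤ 9 + 3)]
    simp only [show ((9:Int)).toNat = 9 from rfl, show ((9:Int) + 3).toNat = 12 from rfl,
               show [' ','=',' '].length = 3 from rfl]
    rw [htake]
    constructor
    · rw [PySem.Dict.getD_insert]
      simp [PySem.List.pyGet?, PySem.List.pyIdx?]
    · exact PySem.Dict.get?_insert_of_ne d _ (by decide)
  · by_cases he : PySem.Chars.startswith s "Exit_status = ".toList = true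
    · obtain ⟨t, ht⟩ := (PySem.Chars.startswith_iff s _).1 he
      have hsform : s = "Exit_status".toList ++ [' ','=',' '] ++ t := by rw [← ht]; rfl
      have hfind : PySem.Chars.find s [' ','=',' '] = (11 : Int) := by
        rw [hsform]; exact_mod_cast field_line "Exit_status".toList t (by decide)
      have htake : s.take 11 = "Exit_status".toList := by
        rw [hsform, List.append_assoc]; exact List.take_left' rfl
      rw [Bool.eq_false_iff.mpr hj, he]
      simp only [if_true, Bool.false_eq_true, if_false]
      rw [splitOnMax_one s [' ','=',' '] (by simp), hfind]
      rw [if_neg (by norm_num : ¬ ((11:Int) = -1)), if_pos (by norm_num : (11:Int) ≠ -1)]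
      rw [PySem.List.slice_to s (by norm_num : (0:Int) ≤ 11),
          PySem.List.slice_from s (by norm_num : (0:Int) ≤ 11 + 3)]
      simp only [show ((11:Int)).toNat = 11 from rfl, show ((11:Int) + 3).toNat = 14 from rfl,
                 show [' ','=',' '].length = 3 from rfl]
      rw [htake]
      constructor
      · exact PySem.Dict.getD_insert_of_ne d _ _ (by decide)
      · rw [PySem.Dict.get?_insert_self]
        simp [PySem.List.pyGet?, PySem.List.pyIdx?]
    · rw [Bool.eq_false_iff.mpr hj, Bool.eq_false_iff.mpr he]
      simp only [Bool.false_eq_true, if_false]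
      by_cases hf : PySem.Chars.find s [' ','=',' '] = -1
      · rw [if_neg (by simp [hf])]
        exact ⟨rfl, rfl⟩
      · have h0 : 0 ≤ PySem.Chars.find s [' ','=',' '] := by
          have := PySem.Chars.neg_one_le_find s [' ','=',' ']; omega
        have hrec := find_recover s hf
        set f := (PySem.Chars.find s [' ','=',' ']).toNat with hfdef
        have hnej : s.take f ≠ "job_state".toList := by
          intro hkk
          apply hj
          apply (PySem.Chars.startswith_iff s _).2
          refine ⟨s.drop (f + 3), ?_⟩
          conv_rhs => rw [hrec]
          rw [hkk]
          rfl
        have hnee : s.take f ≠ "Exit_status".toList := by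
          intro hkk
          apply he
          apply (PySem.Chars.startswith_iff s _).2
          refine ⟨s.drop (f + 3), ?_⟩
          conv_rhs => rw [hrec]
          rw [hkk]
          rfl
        rw [if_pos hf]
        rw [PySem.List.slice_to s h0, PySem.List.slice_from s (by omega)]
        have h3 : (PySem.Chars.find s [' ','=',' '] + 3).toNat = f + 3 := by omega
        rw [h3]
        constructor
        · exact PySem.Dict.getD_insert_of_ne d _ _ (fun hx => hnej hx.symm)
        · exact PySem.Dict.get?_insert_of_ne d _ (fun hx => hnee hx.symm)

-- the fold invariant
theorem fold_inv (lines : List (List Char)) : ∀ (d : PySem.Dict (List Char) (List Char)),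
    (lines.foldl pvStepA (d.getD "job_state".toList [], d.get? "Exit_status".toList)) =
      ((lines.foldl pvStepB d).getD "job_state".toList [],
       (lines.foldl pvStepB d).get? "Exit_status".toList) := by
  induction lines with
  | nil => intro d; rfl
  | cons l ls ih =>
    intro d
    simp only [List.foldl_cons]
    have h := step_inv d l
    have hpair : pvStepA (d.getD "job_state".toList [], d.get? "Exit_status".toList) l =
        ((pvStepB d l).getD "job_state".toList [], (pvStepB d l).get? "Exit_status".toList) :=
      Prod.ext_iff.2 ⟨h.1.symm, h.2.symm⟩
    rw [hpair, ih (pvStepB d l)]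

-- ===== VERDICT (by name: the statement is the Claim_ definition above) =====
theorem parse_qstat_output_spec : Claim_equal_parse_qstat_output := by
  intro output _
  show parse_qstat_output output = parse_qstat_output_alt output
  show (let r := (PySem.Chars.splitlines output.toList).foldl pvStepA (([] : List Char), (none : Option (List Char)))
        (String.ofList r.1, r.2.map String.ofList)) = _
  have hinit : (([] : List Char), (none : Option (List Char))) =
      ((PySem.Dict.empty : PySem.Dict (List Char) (List Char)).getD "job_state".toList [],
       (PySem.Dict.empty : PySem.Dict (List Char) (List Char)).get? "Exit_status".toList) := rfl
  rw [hinit, fold_inv (PySem.Chars.splitlines output.toList) PySem.Dict.empty]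
  rfl
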